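-- pv_equiv track=rewrite | github.com/GowthamSagar310/CompetitiveProgramming | CodeforcesProblems/cf_165A.py | has_upper_lower
-- ===== SOURCE A (Python) =====
-- def has_upper_lower(point, points):
--     has_upper = False
--     has_lower = False
--     for i in range(len(points)):
--         x1, y1 = points[i]
--         if point[0] ==x1:
--             if point[1] > y1:
--                 has_lower = True
--             if point[1] < y1:
--                 has_upper = True
--     return has_upper and has_lower
-- ===== SOURCE B (Python) =====
-- def has_upper_lower(point, points):
--     ys = [y for x, y in points if x == point[0]]
--     return bool(ys) and min(ys) < point[1] < max(ys)
-- ===== Notes on version B (the rewrite author's own statement) =====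
-- stated objective: simpler
-- what changed: Replaces the flag-setting index loop by building the list of same-x y-coordinates once and deciding from its min/max aggregates (min(ys) < y < max(ys)).
import Mathlib
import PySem

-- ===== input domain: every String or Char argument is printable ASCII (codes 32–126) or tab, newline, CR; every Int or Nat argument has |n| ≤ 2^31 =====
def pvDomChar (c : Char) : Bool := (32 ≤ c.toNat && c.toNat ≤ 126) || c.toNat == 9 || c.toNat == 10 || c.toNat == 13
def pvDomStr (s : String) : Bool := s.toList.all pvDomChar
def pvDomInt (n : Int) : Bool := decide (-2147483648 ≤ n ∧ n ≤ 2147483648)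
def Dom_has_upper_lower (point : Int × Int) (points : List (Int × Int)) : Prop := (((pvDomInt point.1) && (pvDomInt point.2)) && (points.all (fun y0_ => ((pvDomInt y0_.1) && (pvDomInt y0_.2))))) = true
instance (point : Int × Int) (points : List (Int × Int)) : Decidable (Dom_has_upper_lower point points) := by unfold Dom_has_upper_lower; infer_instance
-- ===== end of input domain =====

-- B replaces A's flag-setting index loop by collecting the same-x y-coordinates and deciding via min/max aggregates (objective: simpler).


-- ===== PORT A =====
-- literal port of A: flag-setting loop over the points
def has_upper_lower (point : Int × Int) (points : List (Int × Int)) : Bool :=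
  let st := points.foldl (fun (st : Bool × Bool) p =>
    if point.1 == p.1 then
      (if point.2 < p.2 then true else st.1,
       if point.2 > p.2 then true else st.2)
    else st) (false, false)
  st.1 && st.2

-- ===== PORT B =====
-- port of B: collect same-x y-coordinates, decide via min/max aggregates
def has_upper_lower_alt (point : Int × Int) (points : List (Int × Int)) : Bool :=
  let ys := (points.filter (fun p => p.1 == point.1)).map Prod.snd
  match PySem.List.min? ys (fun y => y), PySem.List.max? ys (fun y => y) with
  | some m, some M => decide (m < point.2) && decide (point.2 < M)
  | _, _ => false

-- ===== PRECONDITION & SPEC =====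
def Spec_has_upper_lower (point : Int × Int) (points : List (Int × Int)) (out : Bool) : Prop := out = has_upper_lower_alt point points
instance (point : Int × Int) (points : List (Int × Int)) (out : Bool) : Decidable (Spec_has_upper_lower point points out) := by unfold Spec_has_upper_lower; infer_instance

-- ===== CLAIM (what is proved, stated in full; the proofs are below) =====
def Claim_equal_has_upper_lower : Prop := ∀ (point : Int × Int) (points : List (Int × Int)), Dom_has_upper_lower point points → Spec_has_upper_lower point points (has_upper_lower point points)

-- ===== LEMMAS AND PROOFS =====

-- ===== VERDICT (by name: the statement is the Claim_ definition above) =====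
-- characterisation of A's loop: the flags become existence tests
theorem hul_foldl_char (point : Int × Int) (points : List (Int × Int)) (u l : Bool) :
    points.foldl (fun (st : Bool × Bool) p =>
      if point.1 == p.1 then
        (if point.2 < p.2 then true else st.1,
         if point.2 > p.2 then true else st.2)
      else st) (u, l)
    = (u || points.any (fun p => p.1 == point.1 && decide (point.2 < p.2)),
       l || points.any (fun p => p.1 == point.1 && decide (point.2 > p.2))) := by
  induction points generalizing u l with
  | nil => simp
  | cons h t ih =>
    rw [List.foldl_cons]
    by_cases hx : point.1 = h.1
    · rw [if_pos (show (point.1 == h.1) = true by simp [hx]),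
          show (if point.2 < h.2 then true else u) = (decide (point.2 < h.2) || u) by
            split_ifs with h1 <;> simp [h1],
          show (if point.2 > h.2 then true else l) = (decide (point.2 > h.2) || l) by
            split_ifs with h1 <;> simp [h1], ih]
      cases u <;> cases l <;>
        simp [List.any_cons, hx, Bool.or_comm]
    · rw [if_neg (show ¬ ((point.1 == h.1) = true) by simp [hx]), ih]
      have hb' : (h.1 == point.1) = false := by
        simp only [beq_eq_false_iff_ne, ne_eq]
        exact fun e => hx e.symm
      simp [List.any_cons, hb']

theorem hul_A_char (point : Int × Int) (points : List (Int × Int)) :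
    has_upper_lower point points
    = (points.any (fun p => p.1 == point.1 && decide (point.2 < p.2))
       && points.any (fun p => p.1 == point.1 && decide (point.2 > p.2))) := by
  unfold has_upper_lower
  rw [hul_foldl_char]
  simp

theorem has_upper_lower_spec : Claim_equal_has_upper_lower := by
  intro point points _
  unfold Spec_has_upper_lower has_upper_lower_alt
  rw [hul_A_char]
  simp only []
  cases hm : PySem.List.min? ((points.filter (fun p => p.1 == point.1)).map Prod.snd) (fun y => y) with
  | none =>
    rw [PySem.List.min?_eq_none_iff] at hm
    have hno : ∀ p ∈ points, ¬ p.1 = point.1 := by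
      intro p hp he
      have hf := List.filter_eq_nil_iff.mp (List.map_eq_nil_iff.mp hm) p hp
      simp [he] at hf
    have h1 : points.any (fun p => p.1 == point.1 && decide (point.2 < p.2)) = false := by
      rw [List.any_eq_false]
      intro p hp
      simp [hno p hp]
    simp only [hm, h1, Bool.false_and]
  | some m =>
    have hne : (points.filter (fun p => p.1 == point.1)).map Prod.snd ≠ [] := by
      intro h; rw [h] at hm; simp [PySem.List.min?] at hm
    cases hM : PySem.List.max? ((points.filter (fun p => p.1 == point.1)).map Prod.snd) (fun y => y) with
    | none => rw [PySem.List.max?_eq_none_iff] at hM; exact absurd hM hne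
    | some M =>
      have hmmem := PySem.List.min?_mem hm
      have hMmem := PySem.List.max?_mem hM
      have hmin := PySem.List.min?_isMin hm
      have hmax := PySem.List.max?_isMax hM
      simp only [List.mem_map, List.mem_filter] at hmmem hMmem
      obtain ⟨pm, ⟨hpm, hpmx⟩, hpm2⟩ := hmmem
      obtain ⟨pM, ⟨hpM, hpMx⟩, hpM2⟩ := hMmem
      simp only [beq_iff_eq] at hpmx hpMx
      -- show the two booleans agree
      rw [Bool.eq_iff_iff]
      simp only [Bool.and_eq_true, List.any_eq_true, Bool.and_eq_true, beq_iff_eq,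
        decide_eq_true_eq, gt_iff_lt]
      constructor
      · rintro ⟨⟨pu, hpu, hxu, hyu⟩, ⟨pl, hpl, hxl, hyl⟩⟩
        have h1 : m ≤ pl.2 := hmin pl.2 (by
          simp only [List.mem_map, List.mem_filter]
          exact ⟨pl, ⟨hpl, by simp [hxl]⟩, rfl⟩)
        have h2 : pu.2 ≤ M := hmax pu.2 (by
          simp only [List.mem_map, List.mem_filter]
          exact ⟨pu, ⟨hpu, by simp [hxu]⟩, rfl⟩)
        exact ⟨by omega, by omega⟩
      · rintro ⟨h1, h2⟩
        exact ⟨⟨pM, hpM, hpMx, by omega⟩, ⟨pm, hpm, hpmx, by omega⟩⟩
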